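-- pv_equiv track=rewrite | github.com/yuukanehiro/coding-study | python/algorithm/math/素数/ゴールドバッハ予想/prime_number_primer__goldbach_conjecture/main.py | get_answer
-- ===== SOURCE A (Python) =====
-- from typing import List
--
-- def get_answer(n: int) -> List[int]:
--     if n < 4:
--         return []
--
--
--     is_primers: List[bool] = [True] * (n + 1)
--     is_primers[0] = False
--     is_primers[1] = False
--
--     # 素数判定の格納
--     # エウストテネスの篩
--     for i in range(2, n + 1):
--         if is_primers[i]:
--             for j in range(i * 2, n + 1, i):
--                 is_primers[j] = False
--
--
--     multi = -1
--     ans = [-1, -1]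
--
--     for p in range(n + 1):
--         if is_primers[p]:
--             other_prime = n - p
--             if is_primers[other_prime]:
--                 if p * other_prime > multi:
--                     multi = p * other_prime
--                     ans = [p, other_prime]
--
--     return ans
-- ===== SOURCE B (Python) =====
-- from typing import List
--
-- def get_answer(n: int) -> List[int]:
--     if n < 4:
--         return []
--     sieve = [True] * (n + 1)
--     sieve[0] = sieve[1] = False
--     for i in range(2, n + 1):
--         if sieve[i]:
--             for j in range(i * 2, n + 1, i):
--                 sieve[j] = False
--     # p*(n-p) is strictly increasing for p up to n//2, so the first prime pair
--     # found scanning downward from the middle maximizes the product.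
--     for p in range(n // 2, 1, -1):
--         if sieve[p] and sieve[n - p]:
--             return [p, n - p]
--     return [-1, -1]
-- ===== Notes on version B (the rewrite author's own statement) =====
-- stated objective: simpler
-- what changed: Keeps the sieve but replaces A's full 0..n scan with running max-product tracking by a downward scan from n//2 that early-returns the first prime pair, using that p*(n-p) is maximal at the pair closest to the center.
import Mathlib
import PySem

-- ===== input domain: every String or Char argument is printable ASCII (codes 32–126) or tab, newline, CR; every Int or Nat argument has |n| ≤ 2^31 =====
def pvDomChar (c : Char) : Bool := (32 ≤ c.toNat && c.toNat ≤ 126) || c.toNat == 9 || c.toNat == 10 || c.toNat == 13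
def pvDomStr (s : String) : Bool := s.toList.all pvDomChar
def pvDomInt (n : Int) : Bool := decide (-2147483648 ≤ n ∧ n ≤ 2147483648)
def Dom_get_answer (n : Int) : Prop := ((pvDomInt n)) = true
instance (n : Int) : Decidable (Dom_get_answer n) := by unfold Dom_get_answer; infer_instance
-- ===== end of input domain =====

-- B keeps A's sieve but replaces the full 0..n max-product scan with a downward scan
-- from n//2 that returns the first prime pair (the product is maximal at the center): simpler.

-- ===== PORT A =====
-- Shared Eratosthenes sieve (both Pythons contain the identical sieve code).
-- n ≥ 4 at every call, so all indices are Nats in range; `.set`/`.getD` are exact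
-- for Python's in-range indexing here, and `j.toNat` is exact since j ≥ 2*i ≥ 0.
def pvSieve (N : Nat) : Array Bool :=
  let init := ((Array.replicate (N+1) true).setIfInBounds 0 false).setIfInBounds 1 false
  (List.range' 2 (N-1)).foldl
    (fun acc i =>
      if acc.getD i false then
        (PySem.List.pyRange (2*(i:Int)) ((N:Int)+1) (i:Int)).foldl
          (fun a j => a.setIfInBounds j.toNat false) acc
      else acc) init

def get_answer (n : Int) : List Int :=
  if n < 4 then []
  else
    -- n ≥ 4 here: iterating p over the naturals 0..n is exact for range(n+1)
    let N := n.toNat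
    let pr := pvSieve N
    let r := (List.range (N+1)).foldl
      (fun (s : Int × List Int) p =>
        if pr.getD p false then
          let op := N - p
          if pr.getD op false then
            if (p : Int) * (op : Int) > s.1 then ((p : Int) * (op : Int), [(p : Int), (op : Int)])
            else s
          else s
        else s) (-1, [-1, -1])
    r.2

-- ===== PORT B =====
-- for p in range(n//2, 1, -1): first p with sieve[p] and sieve[n-p] wins
def pvFindDown (pr : Array Bool) (N : Nat) : Nat → List Int
  | 0 => [-1, -1]
  | 1 => [-1, -1]
  | (p+2) =>
    if pr.getD (p+2) false && pr.getD (N-(p+2)) false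
    then [((p:Int)+2), ((N-(p+2) : Nat) : Int)]
    else pvFindDown pr N (p+1)

def get_answer_alt (n : Int) : List Int :=
  if n < 4 then []
  else
    let N := n.toNat
    let pr := pvSieve N
    pvFindDown pr N (N / 2)

-- ===== PRECONDITION & SPEC =====
def Spec_get_answer (n : Int) (out : List Int) : Prop := out = get_answer_alt n
instance (n : Int) (out : List Int) : Decidable (Spec_get_answer n out) := by unfold Spec_get_answer; infer_instance

-- ===== CLAIM (what is proved, stated in full; the proofs are below) =====
def Claim_equal_get_answer : Prop := ∀ (n : Int), Dom_get_answer n → Spec_get_answer n (get_answer n)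

-- ===== LEMMAS AND PROOFS =====

-- proof-side greatest p ≤ q with 2 ≤ p and both p, N-p marked prime
def pvBest (pr : Array Bool) (N : Nat) : Nat → Option Nat
  | 0 => none
  | q+1 =>
    if 1 ≤ q ∧ (pr.getD (q+1) false && pr.getD (N-(q+1)) false) = true
    then some (q+1) else pvBest pr N q

theorem getD_set_self_false (a : Array Bool) (k : Nat) :
    (a.setIfInBounds k false).getD k false = false := by
  rw [Array.getD_eq_getD_getElem?, Array.getElem?_setIfInBounds, if_pos rfl]
  split <;> simp

theorem getD_set_false (a : Array Bool) (k i : Nat) (h : a.getD i false = false) :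
    (a.setIfInBounds k false).getD i false = false := by
  rw [Array.getD_eq_getD_getElem?] at h ⊢
  rw [Array.getElem?_setIfInBounds]
  by_cases hk : k = i
  · rw [if_pos hk]; split <;> simp
  · rw [if_neg hk]; exact h

theorem foldl_pres {α : Type} (P : Array Bool → Prop) (g : Array Bool → α → Array Bool)
    (h : ∀ acc j, P acc → P (g acc j)) :
    ∀ (js : List α) (l : Array Bool), P l → P (js.foldl g l) := by
  intro js
  induction js with
  | nil => intro l hl; simpa using hl
  | cons j js ih => intro l hl; exact ih _ (h _ _ hl)

theorem pvSieve_zero_one (N : Nat) :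
    (pvSieve N).getD 0 false = false ∧ (pvSieve N).getD 1 false = false := by
  unfold pvSieve
  apply foldl_pres (fun l => l.getD 0 false = false ∧ l.getD 1 false = false)
  · intro acc i hp
    by_cases hi : acc.getD i false = true
    · simp only [hi, if_pos]
      apply foldl_pres (fun l => l.getD 0 false = false ∧ l.getD 1 false = false)
      · intro a j ha
        exact ⟨getD_set_false _ _ _ ha.1, getD_set_false _ _ _ ha.2⟩
      · exact hp
    · simp only [hi]; simpa using hp
  · exact ⟨getD_set_false _ _ _ (getD_set_self_false _ _), getD_set_self_false _ _⟩

theorem prod_mono {N a b : Nat} (hab : a ≤ b) (hb : b ≤ N / 2) :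
    (a : Int) * ((N - a : Nat) : Int) ≤ (b : Int) * ((N - b : Nat) : Int) := by
  have ha' : a ≤ N := by omega
  have hb' : b ≤ N := by omega
  have h2 : 2 * b ≤ N := by omega
  have e1 : ((N - a : Nat) : Int) = (N : Int) - a := by push_cast [ha']; ring
  have e2 : ((N - b : Nat) : Int) = (N : Int) - b := by push_cast [hb']; ring
  rw [e1, e2]
  have h3 : (a : Int) ≤ b := by exact_mod_cast hab
  have h4 : 2 * (b : Int) ≤ N := by exact_mod_cast h2
  nlinarith [mul_nonneg (by linarith : (0:Int) ≤ (b:Int) - a) (by linarith : (0:Int) ≤ (N:Int) - a - b)]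

theorem prod_strict_mono {N a b : Nat} (hab : a < b) (hb : b ≤ N / 2) :
    (a : Int) * ((N - a : Nat) : Int) < (b : Int) * ((N - b : Nat) : Int) := by
  have ha' : a ≤ N := by omega
  have hb' : b ≤ N := by omega
  have e1 : ((N - a : Nat) : Int) = (N : Int) - a := by push_cast [ha']; ring
  have e2 : ((N - b : Nat) : Int) = (N : Int) - b := by push_cast [hb']; ring
  rw [e1, e2]
  have h3 : (a : Int) + 1 ≤ b := by exact_mod_cast hab
  have h4 : 2 * (b : Int) ≤ N := by exact_mod_cast (by omega : 2 * b ≤ N)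
  nlinarith [mul_nonneg (by linarith : (0:Int) ≤ (b:Int) - a - 1) (by linarith : (0:Int) ≤ (N:Int) - a - b)]

theorem if_true_eq {α : Sort 1} (X Y : α) : (if true = true then X else Y) = X := if_pos rfl

-- the step function of A's scan, factored for the proofs
def pvStep (pr : Array Bool) (N : Nat) (s : Int × List Int) (p : Nat) : Int × List Int :=
  if pr.getD p false then
    if pr.getD (N - p) false then
      if (p : Int) * ((N - p : Nat) : Int) > s.1
      then ((p : Int) * ((N - p : Nat) : Int), [(p : Int), ((N - p : Nat) : Int)])
      else s
    else s
  else s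

theorem pvStep_cond (pr : Array Bool) (N : Nat) (s : Int × List Int) (p : Nat) :
    pvStep pr N s p =
      if (pr.getD p false && pr.getD (N - p) false) = true then
        (if (p : Int) * ((N - p : Nat) : Int) > s.1
         then ((p : Int) * ((N - p : Nat) : Int), [(p : Int), ((N - p : Nat) : Int)]) else s)
      else s := by
  unfold pvStep
  cases h1 : pr.getD p false <;> cases h2 : pr.getD (N - p) false <;> simp

-- facts about pvBest
theorem pvBest_succ (pr : Array Bool) (N q : Nat) :
    pvBest pr N (q+1) =
      if 1 ≤ q ∧ (pr.getD (q+1) false && pr.getD (N-(q+1)) false) = true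
      then some (q+1) else pvBest pr N q := rfl

theorem pvBest_some {pr : Array Bool} {N : Nat} :
    ∀ {q p : Nat}, pvBest pr N q = some p →
      (pr.getD p false && pr.getD (N-p) false) = true ∧ 2 ≤ p ∧ p ≤ q := by
  intro q
  induction q with
  | zero => intro p h; simp [pvBest] at h
  | succ q ih =>
    intro p h
    rw [pvBest_succ] at h
    split at h
    · rename_i hcnd
      cases h
      exact ⟨hcnd.2, by omega, le_refl _⟩
    · obtain ⟨a1, a2, a3⟩ := ih h
      exact ⟨a1, a2, by omega⟩

theorem pvBest_max {pr : Array Bool} {N : Nat} :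
    ∀ {q r : Nat}, 2 ≤ r → r ≤ q →
      (pr.getD r false && pr.getD (N-r) false) = true →
      ∃ p, pvBest pr N q = some p ∧ r ≤ p := by
  intro q
  induction q with
  | zero => intro r h1 h2; omega
  | succ q ih =>
    intro r h1 h2 hcnd
    rw [pvBest_succ]
    split
    · exact ⟨q+1, rfl, by omega⟩
    · rename_i hb
      rcases Nat.eq_or_lt_of_le h2 with rfl | hlt
      · exact absurd ⟨by omega, hcnd⟩ hb
      · obtain ⟨p, hp, hrp⟩ := ih h1 (by omega) hcnd
        exact ⟨p, hp, hrp⟩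

theorem pvFindDown_succ2 (pr : Array Bool) (N q : Nat) :
    pvFindDown pr N (q+2) =
      if (pr.getD (q+2) false && pr.getD (N-(q+2)) false) = true
      then [((q:Int)+2), ((N-(q+2) : Nat) : Int)]
      else pvFindDown pr N (q+1) := rfl

theorem pvFindDown_eq_best (pr : Array Bool) (N : Nat) :
    ∀ q, pvFindDown pr N q =
      (pvBest pr N q).elim [-1, -1] (fun p => [(p : Int), ((N - p : Nat) : Int)]) := by
  intro q
  induction q with
  | zero => simp [pvFindDown, pvBest]
  | succ q ih =>
    match q, ih with
    | 0, _ => simp [pvFindDown, pvBest]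
    | q+1, ih =>
      rw [pvFindDown_succ2, pvBest_succ]
      cases hcnd : (pr.getD (q+2) false && pr.getD (N-(q+2)) false)
      · simpa using ih
      · rw [if_true_eq, if_pos (⟨by omega, rfl⟩ : 1 ≤ q + 1 ∧ true = true)]
        simp only [Option.elim]
        norm_num
        ring

-- Phase 1: A's scan over 0..q (q ≤ N/2) lands exactly on pvBest's pair
theorem phase1 (pr : Array Bool) (N : Nat)
    (h0 : pr.getD 0 false = false) (h1 : pr.getD 1 false = false) :
    ∀ q, q ≤ N / 2 →
      (List.range (q+1)).foldl (pvStep pr N) (-1, [-1, -1]) =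
        (pvBest pr N q).elim (-1, [-1, -1])
          (fun p => ((p : Int) * ((N - p : Nat) : Int), [(p : Int), ((N - p : Nat) : Int)])) := by
  intro q
  induction q with
  | zero =>
    intro _
    have h0' : (pr.getD 0 false && pr.getD (N - 0) false) = false := by rw [h0]; simp
    rw [List.range_succ]
    simp only [List.range_zero, List.nil_append, List.foldl_cons, List.foldl_nil,
      pvStep_cond, h0']
    simp [pvBest]
  | succ q ih =>
    intro hq
    rw [List.range_succ, List.foldl_append, List.foldl_cons, List.foldl_nil,
        ih (by omega), pvStep_cond, pvBest_succ]
    cases hcnd : (pr.getD (q+1) false && pr.getD (N-(q+1)) false)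
    · simp
    · have hq2 : 2 ≤ q + 1 := by
        by_contra hlt
        have hq0 : q = 0 := by omega
        rw [hq0] at hcnd
        rw [Bool.and_eq_true] at hcnd
        rw [h1] at hcnd
        simp at hcnd
      rw [if_pos (⟨by omega, rfl⟩ : 1 ≤ q ∧ true = true), if_true_eq]
      rcases hB : pvBest pr N q with _ | p
      · simp only [Option.elim]
        have hnn : (0:Int) ≤ ((q+1 : Nat) : Int) * ((N - (q+1) : Nat) : Int) := by positivity
        rw [if_pos (by push_cast at hnn ⊢; linarith)]
      · obtain ⟨hpc, hp2, hpq⟩ := pvBest_some hB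
        have hlt := prod_strict_mono (N := N) (a := p) (b := q+1) (by omega) hq
        simp only [Option.elim]
        rw [if_pos (by push_cast at hlt ⊢; linarith)]

-- Phase 2: the scan over p > N/2 never changes the phase-1 state
theorem phase2 (pr : Array Bool) (N : Nat)
    (h0 : pr.getD 0 false = false) (h1 : pr.getD 1 false = false)
    (S : Int × List Int)
    (hmax : ∀ p, 2 ≤ p → p ≤ N / 2 →
      (pr.getD p false && pr.getD (N-p) false) = true → (p : Int) * ((N - p : Nat) : Int) ≤ S.1) :
    ∀ (r k : Nat), N / 2 + 1 ≤ k → k + r ≤ N + 1 →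
      (List.range' k r).foldl (pvStep pr N) S = S := by
  intro r
  induction r with
  | zero => intro k _ _; simp
  | succ r ih =>
    intro k hk hkr
    rw [List.range'_succ, List.foldl_cons]
    have hstep : pvStep pr N S k = S := by
      rw [pvStep_cond]
      cases hcnd : (pr.getD k false && pr.getD (N-k) false)
      · simp
      · rw [Bool.and_eq_true] at hcnd
        have hkN : k ≤ N := by omega
        have heqk : N - (N - k) = k := by omega
        have hnk2 : 2 ≤ N - k := by
          by_contra hsm
          have : N - k = 0 ∨ N - k = 1 := by omega
          rcases this with h | h <;> rw [h] at hcnd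
          · rw [h0] at hcnd; simp at hcnd
          · rw [h1] at hcnd; simp at hcnd
        have hsym : (pr.getD (N-k) false && pr.getD (N-(N-k)) false) = true := by
          rw [Bool.and_eq_true, heqk]
          exact ⟨hcnd.2, hcnd.1⟩
        have hle := hmax (N - k) hnk2 (by omega) hsym
        rw [heqk] at hle
        rw [if_true_eq, if_neg]
        push Not
        calc (k : Int) * ((N - k : Nat) : Int)
            = ((N - k : Nat) : Int) * (k : Int) := by ring
          _ ≤ S.1 := hle
    rw [hstep]
    exact ih (k+1) (by omega) (by omega)

-- ===== VERDICT (by name: the statement is the Claim_ definition above) =====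
theorem get_answer_spec : Claim_equal_get_answer := by
  intro n _
  unfold Spec_get_answer get_answer get_answer_alt
  by_cases hn : n < 4
  · simp [hn]
  · simp only [hn, if_false]
    set N := n.toNat with hN
    set pr := pvSieve N with hpr
    obtain ⟨h0, h1⟩ := pvSieve_zero_one N
    have hsplit : N + 1 = (N / 2 + 1) + (N - N / 2) := by omega
    have hfold :
        (List.range (N+1)).foldl (pvStep pr N) (-1, [-1, -1]) =
        (List.range' (N/2+1) (N - N/2)).foldl (pvStep pr N)
          ((List.range (N/2+1)).foldl (pvStep pr N) (-1, [-1, -1])) := by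
      rw [hsplit, List.range_eq_range', ← List.range'_append, List.foldl_append]
      simp [List.range_eq_range']
    have hp1 := phase1 pr N h0 h1 (N / 2) (le_refl _)
    have hmax : ∀ p, 2 ≤ p → p ≤ N / 2 →
        (pr.getD p false && pr.getD (N-p) false) = true →
        (p : Int) * ((N - p : Nat) : Int) ≤
          ((pvBest pr N (N/2)).elim (-1, [-1, -1])
            (fun p => ((p : Int) * ((N - p : Nat) : Int),
              [(p : Int), ((N - p : Nat) : Int)])) : Int × List Int).1 := by
      intro p hp2 hpq hc
      obtain ⟨p', hp', hpp'⟩ := pvBest_max hp2 hpq hc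
      obtain ⟨_, _, hp'q⟩ := pvBest_some hp'
      simp only [hp', Option.elim]
      exact prod_mono hpp' hp'q
    rw [hp1] at hfold
    have hp2 := phase2 pr N h0 h1 _ hmax (N - N/2) (N/2+1) (le_refl _) (by omega)
    -- A's fold (as written in the port) is the fold of pvStep
    show ((List.range (N+1)).foldl (pvStep pr N) (-1, [-1, -1])).2 = pvFindDown pr N (N / 2)
    rw [hfold, hp2, pvFindDown_eq_best]
    rcases pvBest pr N (N/2) with _ | p <;> simp
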